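-- pv_equiv track=rewrite | github.com/MRGLabs/ccxt | python/xsys/feist.py | srtf
-- ===== SOURCE A (Python) =====
-- def srtf(key, results):
--     counter = 0
--     char_tup = ""
--     out = [key,'\n']
--     for r in results:
--         for c in r:
--             char_tup += c
--             counter += 1
--             if (counter == 2):
--                 value = int(char_tup, 16)
--                 if value != 0:
--                     char_tup = chr(value)
--                     out.append(char_tup)
--                 counter = 0
--                 char_tup = ""
--     return out
-- ===== SOURCE B (Python) =====
-- def srtf(key, results):
--     s = "".join(results)
--     out = [key, '\n']
--     for i in range(0, len(s) - 1, 2):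
--         value = int(s[i:i+2], 16)
--         if value != 0:
--             out.append(chr(value))
--     return out
-- ===== Notes on version B (the rewrite author's own statement) =====
-- stated objective: simpler
-- what changed: B joins all result strings once and then runs a single stride-2 indexed loop over two-character slices of the joined string, replacing A's nested loops over results and characters with a counter and an accumulating pair buffer.
import Mathlib
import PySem

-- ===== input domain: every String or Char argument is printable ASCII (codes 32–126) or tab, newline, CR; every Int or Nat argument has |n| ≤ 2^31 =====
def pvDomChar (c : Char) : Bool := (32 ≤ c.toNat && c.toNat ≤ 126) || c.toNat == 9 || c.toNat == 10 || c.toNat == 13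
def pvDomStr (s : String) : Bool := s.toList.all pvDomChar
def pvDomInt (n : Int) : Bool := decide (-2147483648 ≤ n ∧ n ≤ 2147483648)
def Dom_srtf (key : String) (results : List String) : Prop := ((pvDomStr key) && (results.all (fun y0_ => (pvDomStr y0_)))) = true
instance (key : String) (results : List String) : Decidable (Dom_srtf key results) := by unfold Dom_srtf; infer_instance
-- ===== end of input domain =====

-- B joins the results once and decodes the joined string with a single stride-2 indexed loop over
-- two-character slices (its own port of int(.,16)), replacing A's nested loops with a counter and
-- an accumulating pair buffer; same return value on all inputs where A returns (objective: simpler).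


-- ===== PORT A =====
-- A-side faithful port of Python's int(s, 16) restricted to the 2-character strings A feeds it:
-- an optional leading/trailing whitespace character or a leading sign next to a single hex digit.
-- none = ValueError.
def hexVal? (c : Char) : Option Int :=
  if '0' ≤ c ∧ c ≤ '9' then some (c.toNat - 48 : Int)
  else if 'a' ≤ c ∧ c ≤ 'f' then some (c.toNat - 87)
  else if 'A' ≤ c ∧ c ≤ 'F' then some (c.toNat - 55)
  else none

def isPyWS (c : Char) : Bool :=
  c = ' ' || c = '\t' || c = '\n' || c = '\r' || c = Char.ofNat 11 || c = Char.ofNat 12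

def intHex2? (l : List Char) : Option Int :=
  match l with
  | [c, d] =>
    match hexVal? c, hexVal? d with
    | some x, some y => some (16 * x + y)
    | some x, none => if isPyWS d then some x else none
    | none, some y =>
        if isPyWS c || c = '+' then some y
        else if c = '-' then some (-y) else none
    | none, none => none
  | _ => none

-- A's loop body; state = (counter, char_tup, out). On inputs excluded by Pre_srtf
-- Python raises (int ValueError, or chr on a negative value); there the port uses
-- getD 0 / toNat as inert defaults — Pre_srtf excludes exactly those inputs.
def srtfStep (st : Int × List Char × List String) (c : Char) : Int × List Char × List String :=
  let char_tup := st.2.1 ++ [c]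
  let counter := st.1 + 1
  if counter = 2 then
    let value := (intHex2? char_tup).getD 0
    if value ≠ 0 then (0, [], st.2.2 ++ [String.mk [Char.ofNat value.toNat]])
    else (0, [], st.2.2)
  else (counter, char_tup, st.2.2)

def srtf (key : String) (results : List String) : List String :=
  (results.foldl (fun st r => r.toList.foldl srtfStep st) (0, [], [key, "\n"])).2.2

-- ===== PORT B =====
-- B-side port of int(pair, 16): strip whitespace, take an optional sign, then fold the hex digits
-- (exact for the 2-character slices B feeds it; none = ValueError, as on the A side).
def wsB (c : Char) : Bool := c ∈ [' ', '\t', '\n', '\r', Char.ofNat 11, Char.ofNat 12]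

def hexDigit? (c : Char) : Option Nat :=
  let d := c.toLower
  if d.isDigit then some (d.toNat - 48)
  else if 'a' ≤ d && d ≤ 'f' then some (d.toNat - 87)
  else none

def parseHex? (cs : List Char) : Option Int :=
  let core := ((cs.dropWhile wsB).reverse.dropWhile wsB).reverse
  let signed : Int × List Char :=
    match core with
    | '+' :: r => (1, r)
    | '-' :: r => (-1, r)
    | r => (1, r)
  match signed.2.mapM hexDigit? with
  | some (d :: ds) => some (signed.1 * ((d :: ds).foldl (fun a x => 16 * a + (x : Int)) 0))
  | _ => none

-- B's loop body at index i: decode the slice s[i:i+2]; chr on a value Pre_srtf admits.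
def srtfSlot (s : List Char) (out : List String) (i : Int) : List String :=
  let value := (parseHex? (PySem.List.slice s (some i) (some (i + 2)))).getD 0
  if value ≠ 0 then out ++ [(Char.ofNat value.toNat).toString] else out

def srtf_alt (key : String) (results : List String) : List String :=
  (PySem.List.pyRange 0 (PySem.Str.len (PySem.Str.join "" results) - 1) 2).foldl
    (srtfSlot (PySem.Str.join "" results).toList) [key, "\n"]

-- ===== PRECONDITION & SPEC =====
-- Pre_srtf holds exactly when Python A returns normally: every complete 2-character
-- chunk of the joined results is accepted by int(·, 16) with a non-negative value
-- (a bad pair raises ValueError; a negative value makes chr raise ValueError).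
def goodPair (c d : Char) : Bool :=
  ((hexVal? c).isSome && (hexVal? d).isSome) ||
  (isPyWS c && (hexVal? d).isSome) ||
  ((hexVal? c).isSome && isPyWS d) ||
  (c = '+' && (hexVal? d).isSome) ||
  (c = '-' && d = '0')

def goodPairs : List Char → Bool
  | c :: d :: rest => goodPair c d && goodPairs rest
  | _ => true

def Pre_srtf (key : String) (results : List String) : Prop :=
  goodPairs ((results.map String.toList).flatten) = true
instance (key : String) (results : List String) : Decidable (Pre_srtf key results) := by
  unfold Pre_srtf; infer_instance

def pvWitness_srtf : String × List String := ("k", ["41", "00ff"])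

def Spec_srtf (key : String) (results : List String) (out : List String) : Prop := out = srtf_alt key results
instance (key : String) (results : List String) (out : List String) : Decidable (Spec_srtf key results out) := by unfold Spec_srtf; infer_instance

-- ===== CLAIM (what is proved, stated in full; the proofs are below) =====
def Claim_equal_srtf : Prop := ∀ (key : String) (results : List String), Dom_srtf key results → Pre_srtf key results → Spec_srtf key results (srtf key results)

-- ===== LEMMAS AND PROOFS =====

-- common reference form: decode the character list two at a time
def chop : List Char → List String → List String
  | a :: b :: rest, out =>
      let value := (parseHex? [a, b]).getD 0
      chop rest (if value ≠ 0 then out ++ [(Char.ofNat value.toNat).toString] else out)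
  | _, out => out

theorem charToString_mk (c : Char) : c.toString = String.mk [c] := rfl

-- the two hex parsers agree on every pair Pre_srtf admits (ASCII via Dom)
set_option maxHeartbeats 4000000 in
set_option maxRecDepth 10000 in
theorem pairAgree : ∀ n < 127, ∀ m < 127,
    goodPair (Char.ofNat n) (Char.ofNat m) = true →
    parseHex? [Char.ofNat n, Char.ofNat m] = intHex2? [Char.ofNat n, Char.ofNat m] := by decide

theorem pairAgree' (a b : Char) (ha : a.toNat < 127) (hb : b.toNat < 127)
    (h : goodPair a b = true) : parseHex? [a, b] = intHex2? [a, b] := by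
  have := pairAgree a.toNat ha b.toNat hb
  rw [Char.ofNat_toNat, Char.ofNat_toNat] at this
  exact this h

-- A's nested foldl over results equals the foldl over the joined character list.
theorem srtf_foldl_flatten (results : List String) (st : Int × List Char × List String) :
    results.foldl (fun st r => r.toList.foldl srtfStep st) st
      = ((results.map String.toList).flatten).foldl srtfStep st := by
  induction results generalizing st with
  | nil => simp
  | cons r rs ih => simp [List.foldl_append, ih]

-- A's state machine, from a reset state, is the two-at-a-time decode.
theorem A_eq_chop : ∀ (l : List Char) (out : List String),
    (∀ c ∈ l, c.toNat < 127) → goodPairs l = true →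
    (l.foldl srtfStep (0, [], out)).2.2 = chop l out
  | [], out => by intro _ _; simp [chop]
  | [a], out => by intro _ _; simp [chop, srtfStep]
  | a :: b :: rest, out => by
    intro hdom hgood
    have hg : goodPair a b = true ∧ goodPairs rest = true := by
      simpa [goodPairs, Bool.and_eq_true] using hgood
    have hpa : parseHex? [a, b] = intHex2? [a, b] :=
      pairAgree' a b (hdom a (by simp)) (hdom b (by simp)) hg.1
    have hstep : srtfStep (srtfStep (0, [], out) a) b
        = (0, [], if (intHex2? [a, b]).getD 0 ≠ 0
            then out ++ [String.mk [Char.ofNat ((intHex2? [a, b]).getD 0).toNat]] else out) := by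
      simp [srtfStep]
      split <;> rfl
    rw [List.foldl_cons, List.foldl_cons, hstep]
    rw [A_eq_chop rest _ (fun c hc => hdom c (by simp [hc])) hg.2]
    simp only [chop, hpa, charToString_mk]

-- pyRange with step 2: induction and shift forms
theorem pyRange_two_cons (a b : Int) (h : a < b) :
    PySem.List.pyRange a b 2 = a :: PySem.List.pyRange (a + 2) b 2 := by
  rw [PySem.List.pyRange_of_pos _ _ (by norm_num), PySem.List.pyRange_of_pos _ _ (by norm_num)]
  by_cases h2 : a + 2 < b
  · have hc : (if a < b then ((b - a + 2 - 1) / 2).toNat else 0)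
        = (if a + 2 < b then ((b - (a + 2) + 2 - 1) / 2).toNat else 0) + 1 := by
      simp only [h, h2, if_pos]; omega
    rw [hc, List.range_succ_eq_map]
    simp only [List.map_cons, List.map_map, add_zero, Nat.cast_zero, mul_zero]
    refine congrArg (a :: ·) (List.map_congr_left fun k _ => ?_)
    simp [Function.comp]; ring
  · have hc : (if a < b then ((b - a + 2 - 1) / 2).toNat else 0) = 1 := by
      simp only [h, if_pos]; omega
    have hc2 : (if a + 2 < b then ((b - (a + 2) + 2 - 1) / 2).toNat else 0) = 0 := by
      simp [h2]
    rw [hc, hc2]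
    simp

theorem pyRange_two_shift (b : Int) :
    PySem.List.pyRange 2 b 2 = (PySem.List.pyRange 0 (b - 2) 2).map (· + 2) := by
  rw [PySem.List.pyRange_of_pos _ _ (by norm_num), PySem.List.pyRange_of_pos _ _ (by norm_num)]
  have hc : (if (2:Int) < b then ((b - 2 + 2 - 1) / 2).toNat else 0)
      = (if (0:Int) < b - 2 then ((b - 2 - 0 + 2 - 1) / 2).toNat else 0) := by
    split_ifs <;> omega
  rw [hc]
  simp only [List.map_map]
  exact List.map_congr_left fun k _ => by simp [Function.comp]; ring

-- B's stride-2 indexed fold is the two-at-a-time decode.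
theorem B_eq_chop : ∀ (l : List Char) (out : List String),
    (PySem.List.pyRange 0 ((l.length : Int) - 1) 2).foldl (srtfSlot l) out = chop l out
  | [], out => rfl
  | [a], out => rfl
  | a :: b :: rest, out => by
    have hlen : ((a :: b :: rest).length : Int) - 1 = (rest.length : Int) + 1 := by
      simp [List.length_cons]
    rw [hlen, pyRange_two_cons 0 _ (by positivity), zero_add, pyRange_two_shift]
    have hshift : ((rest.length : Int) + 1) - 2 = (rest.length : Int) - 1 := by ring
    rw [hshift, List.foldl_cons, List.foldl_map]
    have hfirst : srtfSlot (a :: b :: rest) out 0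
        = (if (parseHex? [a, b]).getD 0 ≠ 0 then
            out ++ [(Char.ofNat ((parseHex? [a, b]).getD 0).toNat).toString] else out) := by
      simp [srtfSlot, PySem.List.slice_toNat (a := (0:Int)) (b := (2:Int)) _ (by norm_num) (by norm_num)]
    rw [hfirst]
    rw [PySem.List.foldl_congr_mem _ _ (srtfSlot rest) _ ?_]
    · exact B_eq_chop rest _
    · intro acc i hi
      have hi0 : 0 ≤ i := by
        have := (PySem.List.mem_pyRange_iff_of_pos (by norm_num) i).1 hi
        exact this.1
      have h1 : PySem.List.slice (a :: b :: rest) (some (i + 2)) (some (i + 2 + 2))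
          = PySem.List.slice rest (some i) (some (i + 2)) := by
        rw [PySem.List.slice_toNat _ (by omega) (by omega),
            PySem.List.slice_toNat _ (by omega) (by omega)]
        have e1 : (i + 2).toNat = i.toNat + 2 := by omega
        have e2 : (i + 2 + 2).toNat = i.toNat + 2 + 2 := by omega
        rw [e1, e2]
        simp only [List.drop_succ_cons]
        congr 1
        omega
      simp only [srtfSlot, h1]

-- join with the empty separator is flatten
theorem join_empty_flatten (parts : List (List Char)) :
    PySem.Chars.join [] parts = parts.flatten := by
  simp [PySem.Chars.join, List.intercalate]
  induction parts with
  | nil => rfl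
  | cons p ps ih => cases ps <;> simp_all [List.intersperse]

-- Dom gives ASCII codes below 127 for every joined character
theorem dom_chars (results : List String) (h : results.all pvDomStr = true) :
    ∀ c ∈ (results.map String.toList).flatten, c.toNat < 127 := by
  intro c hc
  rw [List.mem_flatten] at hc
  obtain ⟨l, hl, hcl⟩ := hc
  rw [List.mem_map] at hl
  obtain ⟨s, hs, rfl⟩ := hl
  have := (List.all_eq_true.1 h) s hs
  have hcd := (List.all_eq_true.1 this) c hcl
  simp only [pvDomChar, Bool.or_eq_true, Bool.and_eq_true, decide_eq_true_eq,
    Nat.beq_eq_true_eq] at hcd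
  omega

-- ===== VERDICT (by name: the statement is the Claim_ definition above) =====
theorem srtf_spec : Claim_equal_srtf := by
  intro key results hdom hpre
  unfold Spec_srtf srtf srtf_alt
  have hflat : (PySem.Str.join "" results).toList = (results.map String.toList).flatten := by
    rw [PySem.Str.toList_join]
    exact join_empty_flatten _
  have hall : results.all pvDomStr = true := by
    unfold Dom_srtf at hdom
    exact (Bool.and_eq_true_iff.1 hdom).2
  rw [srtf_foldl_flatten]
  rw [A_eq_chop _ _ (dom_chars results hall) hpre]
  rw [PySem.Str.len_eq, hflat]
  exact (B_eq_chop _ _).symm
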